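-- pv_equiv track=rewrite | github.com/nikogamulin/slovenia-traffic-analysis | scripts/generate_figure_catalog.py | _categorize_figure
-- ===== SOURCE A (Python) =====
-- def _categorize_figure(fig_name):
--     """Categorize figure by content"""
--     name_lower = fig_name.lower()
--
--     if any(term in name_lower for term in ['fundamental', 'speed', 'density', 'relationship']):
--         return 'Traffic Analysis'
--     elif any(term in name_lower for term in ['economic', 'cost', 'benefit', 'waterfall']):
--         return 'Economic Analysis'
--     elif any(term in name_lower for term in ['roc', 'accident', 'risk', 'threshold']):
--         return 'Safety Analysis'
--     elif any(term in name_lower for term in ['capacity', 'utilization', 'projection']):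
--         return 'Capacity Analysis'
--     elif any(term in name_lower for term in ['temporal', 'daily', 'weekly', 'trend']):
--         return 'Temporal Analysis'
--     elif any(term in name_lower for term in ['network', 'resilience', 'cascade']):
--         return 'Network Analysis'
--     elif any(term in name_lower for term in ['distribution', 'histogram']):
--         return 'Statistical Distribution'
--     else:
--         return 'General Analysis'
-- ===== SOURCE B (Python) =====
-- _TERM_CATEGORY = {
--     'fundamental': (0, 'Traffic Analysis'),
--     'speed': (0, 'Traffic Analysis'),
--     'density': (0, 'Traffic Analysis'),
--     'relationship': (0, 'Traffic Analysis'),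
--     'economic': (1, 'Economic Analysis'),
--     'cost': (1, 'Economic Analysis'),
--     'benefit': (1, 'Economic Analysis'),
--     'waterfall': (1, 'Economic Analysis'),
--     'roc': (2, 'Safety Analysis'),
--     'accident': (2, 'Safety Analysis'),
--     'risk': (2, 'Safety Analysis'),
--     'threshold': (2, 'Safety Analysis'),
--     'capacity': (3, 'Capacity Analysis'),
--     'utilization': (3, 'Capacity Analysis'),
--     'projection': (3, 'Capacity Analysis'),
--     'temporal': (4, 'Temporal Analysis'),
--     'daily': (4, 'Temporal Analysis'),
--     'weekly': (4, 'Temporal Analysis'),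
--     'trend': (4, 'Temporal Analysis'),
--     'network': (5, 'Network Analysis'),
--     'resilience': (5, 'Network Analysis'),
--     'cascade': (5, 'Network Analysis'),
--     'distribution': (6, 'Statistical Distribution'),
--     'histogram': (6, 'Statistical Distribution'),
-- }
--
-- def _categorize_figure(fig_name):
--     """Categorize figure by content: best (lowest-priority-index) matching keyword wins."""
--     name_lower = fig_name.lower()
--     best = None
--     for term, (prio, cat) in _TERM_CATEGORY.items():
--         if term in name_lower and (best is None or prio < best[0]):
--             best = (prio, cat)
--     return best[1] if best is not None else 'General Analysis'
-- ===== Notes on version B (the rewrite author's own statement) =====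
-- stated objective: alternative
-- what changed: Replaced the ordered if/elif chain (first-match short-circuit over category term lists) with a flat term->(priority, category) map scanned once with a running-minimum accumulator: the lowest-priority matching keyword decides the category.
import Mathlib
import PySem

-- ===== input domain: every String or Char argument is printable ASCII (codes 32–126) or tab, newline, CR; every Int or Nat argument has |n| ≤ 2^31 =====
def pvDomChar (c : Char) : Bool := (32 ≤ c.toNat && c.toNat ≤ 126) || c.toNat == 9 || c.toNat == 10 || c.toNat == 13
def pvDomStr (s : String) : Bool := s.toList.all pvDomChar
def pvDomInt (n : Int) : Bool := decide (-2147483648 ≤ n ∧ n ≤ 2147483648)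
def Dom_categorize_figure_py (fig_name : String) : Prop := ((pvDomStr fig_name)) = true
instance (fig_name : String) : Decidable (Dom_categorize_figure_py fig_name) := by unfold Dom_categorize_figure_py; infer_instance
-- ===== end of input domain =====

-- B replaces the if/elif first-match chain with a flat term->(priority, category) map scanned once
-- with a running-minimum accumulator: the lowest-priority matching keyword decides the category.

-- ===== PORT A =====
-- literal port of the if/elif chain: each branch tests any(term in name_lower for term in [...])
def categorize_figure_py (fig_name : String) : String :=
  let name_lower := PySem.Str.lower fig_name
  if ["fundamental", "speed", "density", "relationship"].any (fun t => PySem.Str.isIn t name_lower) then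
    "Traffic Analysis"
  else if ["economic", "cost", "benefit", "waterfall"].any (fun t => PySem.Str.isIn t name_lower) then
    "Economic Analysis"
  else if ["roc", "accident", "risk", "threshold"].any (fun t => PySem.Str.isIn t name_lower) then
    "Safety Analysis"
  else if ["capacity", "utilization", "projection"].any (fun t => PySem.Str.isIn t name_lower) then
    "Capacity Analysis"
  else if ["temporal", "daily", "weekly", "trend"].any (fun t => PySem.Str.isIn t name_lower) then
    "Temporal Analysis"
  else if ["network", "resilience", "cascade"].any (fun t => PySem.Str.isIn t name_lower) then
    "Network Analysis"
  else if ["distribution", "histogram"].any (fun t => PySem.Str.isIn t name_lower) then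
    "Statistical Distribution"
  else
    "General Analysis"

-- ===== PORT B =====
-- the module-level dict _TERM_CATEGORY of Source B (association list in insertion order)
def pvTermCategory : List (String × (Int × String)) :=
  [("fundamental", (0, "Traffic Analysis")),
   ("speed", (0, "Traffic Analysis")),
   ("density", (0, "Traffic Analysis")),
   ("relationship", (0, "Traffic Analysis")),
   ("economic", (1, "Economic Analysis")),
   ("cost", (1, "Economic Analysis")),
   ("benefit", (1, "Economic Analysis")),
   ("waterfall", (1, "Economic Analysis")),
   ("roc", (2, "Safety Analysis")),
   ("accident", (2, "Safety Analysis")),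
   ("risk", (2, "Safety Analysis")),
   ("threshold", (2, "Safety Analysis")),
   ("capacity", (3, "Capacity Analysis")),
   ("utilization", (3, "Capacity Analysis")),
   ("projection", (3, "Capacity Analysis")),
   ("temporal", (4, "Temporal Analysis")),
   ("daily", (4, "Temporal Analysis")),
   ("weekly", (4, "Temporal Analysis")),
   ("trend", (4, "Temporal Analysis")),
   ("network", (5, "Network Analysis")),
   ("resilience", (5, "Network Analysis")),
   ("cascade", (5, "Network Analysis")),
   ("distribution", (6, "Statistical Distribution")),
   ("histogram", (6, "Statistical Distribution"))]

-- Source B's loop body: update 'best' when the term matches and its priority improves on best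
def pvStep (name_lower : String) (best : Option (Int × String)) (tc : String × (Int × String)) :
    Option (Int × String) :=
  if PySem.Str.isIn tc.1 name_lower &&
     (best.isNone || decide (tc.2.1 < (best.getD (0, "")).1)) then
    some tc.2
  else best

def categorize_figure_py_alt (fig_name : String) : String :=
  let name_lower := PySem.Str.lower fig_name
  match pvTermCategory.foldl (pvStep name_lower) none with
  | some b => b.2
  | none => "General Analysis"

-- ===== PRECONDITION & SPEC =====
def Spec_categorize_figure_py (fig_name : String) (out : String) : Prop := out = categorize_figure_py_alt fig_name
instance (fig_name : String) (out : String) : Decidable (Spec_categorize_figure_py fig_name out) := by unfold Spec_categorize_figure_py; infer_instance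

-- ===== CLAIM (what is proved, stated in full; the proofs are below) =====
def Claim_equal_categorize_figure_py : Prop := ∀ (fig_name : String), Dom_categorize_figure_py fig_name → Spec_categorize_figure_py fig_name (categorize_figure_py fig_name)

-- ===== LEMMAS AND PROOFS =====

-- proof helper: the category of the first matching term (what the min-scan computes on a
-- priority-sorted list)
def pvFirstCat (name_lower : String) : List (String × (Int × String)) → String
  | [] => "General Analysis"
  | x :: rest =>
    if PySem.Str.isIn x.1 name_lower then x.2.2 else pvFirstCat name_lower rest

-- once 'best' is set, terms of priority ≥ best's never update it
theorem pvStep_freeze (nl : String) (pc : Int × String) :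
    ∀ (l : List (String × (Int × String))), (∀ x ∈ l, pc.1 ≤ x.2.1) →
      l.foldl (pvStep nl) (some pc) = some pc := by
  intro l
  induction l with
  | nil => intro _; rfl
  | cons x rest ih =>
    intro h
    have hx : pc.1 ≤ x.2.1 := h x (by simp)
    have hstep : pvStep nl (some pc) x = some pc := by
      simp only [pvStep, Option.isNone_some, Option.getD_some, Bool.false_or]
      simp [not_lt.mpr hx]
    simp only [List.foldl, hstep]
    exact ih (fun y hy => h y (by simp [hy]))

-- on a list with nondecreasing priorities the min-scan returns the first matching term
theorem pvFold_eq_firstCat (nl : String) :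
    ∀ (l : List (String × (Int × String))),
      l.Pairwise (fun a b => a.2.1 ≤ b.2.1) →
      (match l.foldl (pvStep nl) none with
       | some b => b.2
       | none => "General Analysis") = pvFirstCat nl l := by
  intro l
  induction l with
  | nil => intro _; rfl
  | cons x rest ih =>
    intro h
    rcases List.pairwise_cons.mp h with ⟨h1, h2⟩
    by_cases hin : PySem.Str.isIn x.1 nl = true
    · have hstep : pvStep nl none x = some x.2 := by
        simp only [pvStep, Option.isNone_none, Bool.true_or, Bool.and_true, hin, if_true]
      simp only [List.foldl, hstep, pvStep_freeze nl x.2 rest h1, pvFirstCat, hin, if_true]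
    · have hin' : PySem.Str.isIn x.1 nl = false := by
        cases hb : PySem.Str.isIn x.1 nl
        · rfl
        · exact absurd hb hin
      have hstep : pvStep nl none x = none := by
        simp only [pvStep, hin', Bool.false_and, Bool.false_eq_true, if_false]
      simp only [List.foldl, hstep, pvFirstCat, hin', if_false, Bool.false_eq_true]
      exact ih h2

-- splitting a disjunctive guard into two nested guards
theorem pvIfOr (c d : Bool) (x y : String) :
    (if c || d then x else y) = if c then x else if d then x else y := by
  cases c <;> simp

-- ===== VERDICT (by name: the statement is the Claim_ definition above) =====
theorem categorize_figure_py_spec : Claim_equal_categorize_figure_py := by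
  intro fig_name _
  show categorize_figure_py fig_name = categorize_figure_py_alt fig_name
  have hpair : pvTermCategory.Pairwise (fun a b => a.2.1 ≤ b.2.1) := by
    unfold pvTermCategory; decide
  have halt : categorize_figure_py_alt fig_name
      = pvFirstCat (PySem.Str.lower fig_name) pvTermCategory := by
    unfold categorize_figure_py_alt
    exact pvFold_eq_firstCat (PySem.Str.lower fig_name) pvTermCategory hpair
  rw [halt]
  simp only [categorize_figure_py, pvFirstCat, pvTermCategory,
    List.any_cons, List.any_nil, Bool.or_false, pvIfOr]
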